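-- pv_equiv track=rewrite | github.com/tkell/alles | morning_sound_bath.py | get_start_times
-- ===== SOURCE A (Python) =====
-- def get_start_times(durations, start_offset):
--     starts_and_durations = []
--     for i, duration in enumerate(durations):
--         if i == 0:
--             starts_and_durations.append((0 + start_offset, duration))
--         else:
--             starts_and_durations.append((sum(durations[0:i]) + start_offset, duration))
--     return starts_and_durations
-- ===== SOURCE B (Python) =====
-- def get_start_times(durations, start_offset):
--     # One cumulative pass builds the start-time table, then pair it with durations.
--     starts = []
--     total = start_offset
--     for duration in durations:
--         starts.append(total)
--         total += duration
--     return list(zip(starts, durations))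
-- ===== Notes on version B (the rewrite author's own statement) =====
-- stated objective: faster
-- what changed: Replaces A's per-index re-summation of durations[0:i] inside the loop by a single running-total pass that builds the start table, followed by a separate zip with the durations.
import Mathlib
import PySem

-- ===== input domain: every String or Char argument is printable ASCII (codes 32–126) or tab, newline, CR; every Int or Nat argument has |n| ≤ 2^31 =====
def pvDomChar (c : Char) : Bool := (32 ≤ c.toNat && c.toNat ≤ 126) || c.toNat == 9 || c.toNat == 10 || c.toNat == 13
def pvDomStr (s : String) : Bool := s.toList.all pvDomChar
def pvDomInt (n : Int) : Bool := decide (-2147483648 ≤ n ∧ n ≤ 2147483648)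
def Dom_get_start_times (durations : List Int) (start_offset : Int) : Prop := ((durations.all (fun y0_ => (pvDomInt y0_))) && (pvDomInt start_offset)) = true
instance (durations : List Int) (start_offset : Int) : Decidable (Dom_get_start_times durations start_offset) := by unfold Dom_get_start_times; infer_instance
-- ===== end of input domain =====

-- B replaces A's per-index re-summation of durations[0:i] with a single running-total pass
-- building the start table, then zips it with the durations (objective: faster).


-- ===== PORT A =====
def get_start_times (durations : List Int) (start_offset : Int) : List (Int × Int) :=
  (PySem.List.enumerate durations).foldl
    (fun starts_and_durations p =>
      if p.1 = 0 then
        starts_and_durations ++ [(0 + start_offset, p.2)]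
      else
        starts_and_durations ++ [((PySem.List.slice durations (some 0) (some p.1)).sum + start_offset, p.2)])
    []

-- ===== PORT B =====
def get_start_times_alt (durations : List Int) (start_offset : Int) : List (Int × Int) :=
  (durations.foldl (fun (p : List Int × Int) duration => (p.1 ++ [p.2], p.2 + duration)) ([], start_offset)).1.zip durations

-- ===== PRECONDITION & SPEC =====
def Spec_get_start_times (durations : List Int) (start_offset : Int) (out : List (Int × Int)) : Prop := out = get_start_times_alt durations start_offset
instance (durations : List Int) (start_offset : Int) (out : List (Int × Int)) : Decidable (Spec_get_start_times durations start_offset out) := by unfold Spec_get_start_times; infer_instance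

-- ===== CLAIM (what is proved, stated in full; the proofs are below) =====
def Claim_equal_get_start_times : Prop := ∀ (durations : List Int) (start_offset : Int), Dom_get_start_times durations start_offset → Spec_get_start_times durations start_offset (get_start_times durations start_offset)

-- ===== LEMMAS AND PROOFS =====

-- canonical recursion both programs are reduced to
def gstCanon : List Int → Int → List (Int × Int)
  | [], _ => []
  | d :: ds, o => (o, d) :: gstCanon ds (o + d)

-- the start table B's first pass builds
def startsOf : List Int → Int → List Int
  | [], _ => []
  | d :: ds, o => o :: startsOf ds (o + d)

theorem gstCanon_length (ds : List Int) (o : Int) : (gstCanon ds o).length = ds.length := by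
  induction ds generalizing o with
  | nil => rfl
  | cons d ds ih => simp [gstCanon, ih]

theorem gstCanon_getElem (ds : List Int) (o : Int) (k : Nat) (h : k < ds.length) :
    (gstCanon ds o)[k]'(by rw [gstCanon_length]; exact h) = ((ds.take k).sum + o, ds[k]) := by
  induction ds generalizing o k with
  | nil => simp at h
  | cons d ds ih =>
    cases k with
    | zero => simp [gstCanon]
    | succ k =>
      have hk : k < ds.length := Nat.succ_lt_succ_iff.mp (by simpa using h)
      simp only [gstCanon, List.getElem_cons_succ, List.take_succ_cons, List.sum_cons]
      rw [ih (o + d) k hk]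
      simp only [Prod.mk.injEq, and_true]
      ring

theorem portA_eq_canon (ds : List Int) (o : Int) : get_start_times ds o = gstCanon ds o := by
  unfold get_start_times
  have hfun : (fun (starts_and_durations : List (Int × Int)) (p : Int × Int) =>
      if p.1 = 0 then starts_and_durations ++ [(0 + o, p.2)]
      else starts_and_durations ++ [((PySem.List.slice ds (some 0) (some p.1)).sum + o, p.2)])
      = fun starts_and_durations p => starts_and_durations ++
          [if p.1 = 0 then (0 + o, p.2) else ((PySem.List.slice ds (some 0) (some p.1)).sum + o, p.2)] := by
    funext acc p; split <;> rfl
  rw [hfun, PySem.List.foldl_append_singleton_eq_map, List.nil_append]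
  apply List.ext_getElem
  · simp [gstCanon_length, PySem.List.length_enumerate]
  · intro k h1 h2
    have hk : k < ds.length := by simpa [PySem.List.length_enumerate] using h1
    rw [List.getElem_map, PySem.List.getElem_enumerate, gstCanon_getElem ds o k hk]
    by_cases hz : k = 0
    · subst hz; simp
    · have : ((0 : Int) + (k : Int)) ≠ 0 := by
        have : (0 : Nat) < k := Nat.pos_of_ne_zero hz
        omega
      rw [if_neg this]
      rw [show ((0 : Int) + (k : Int)) = ((k : Nat) : Int) by ring]
      rw [PySem.List.slice_zero_start, PySem.List.slice_to_natCast]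

theorem foldl_scan (ds : List Int) (acc : List Int) (o : Int) :
    (ds.foldl (fun (p : List Int × Int) duration => (p.1 ++ [p.2], p.2 + duration)) (acc, o)).1
      = acc ++ startsOf ds o := by
  induction ds generalizing acc o with
  | nil => simp [startsOf]
  | cons d ds ih => simp [List.foldl_cons, ih, startsOf]

theorem zip_startsOf (ds : List Int) (o : Int) : (startsOf ds o).zip ds = gstCanon ds o := by
  induction ds generalizing o with
  | nil => rfl
  | cons d ds ih => simp [startsOf, gstCanon, List.zip_cons_cons, ih]

theorem portB_eq_canon (ds : List Int) (o : Int) : get_start_times_alt ds o = gstCanon ds o := by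
  unfold get_start_times_alt
  rw [foldl_scan ds [] o, List.nil_append, zip_startsOf]

-- ===== VERDICT (by name: the statement is the Claim_ definition above) =====
theorem get_start_times_spec : Claim_equal_get_start_times := by
  intro durations start_offset _
  unfold Spec_get_start_times
  rw [portA_eq_canon, portB_eq_canon]
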